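-- pv_equiv track=rewrite | github.com/versa-networks/devops | python/PAN-to-Versa-Conversion/scripts/step-2.py | split_bracket_content
-- ===== SOURCE A (Python) =====
-- from typing import Dict, List, Optional, Tuple, Set
--
-- def split_bracket_content(content: str) -> List[Tuple[str, bool]]:
--
--     out: List[Tuple[str, bool]] = []
--     i = 0
--     n = len(content)
--
--     while i < n:
--         while i < n and (content[i].isspace() or content[i] == ","):
--             i += 1
--         if i >= n:
--             break
--
--         if content[i] == '"':
--             i += 1
--             start = i
--             while i < n and content[i] != '"':
--                 i += 1
--             if i >= n:
--                 token = content[start:].strip()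
--                 if token:
--                     out.append((token, True))
--                 break
--             token = content[start:i]
--             out.append((token, True))
--             i += 1
--         else:
--             start = i
--             while i < n and (not content[i].isspace()) and content[i] != ",":
--                 i += 1
--             token = content[start:i].strip()
--             if token:
--                 out.append((token, False))
--
--     return out
-- ===== SOURCE B (Python) =====
-- from typing import List, Tuple
--
-- def split_bracket_content(content: str) -> List[Tuple[str, bool]]:
--     # single-pass state machine: 0 = between tokens, 1 = inside unquoted, 2 = inside quoted
--     out: List[Tuple[str, bool]] = []
--     mode = 0
--     buf: List[str] = []
--     for c in content:
--         if mode == 2: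
--             if c == '"':
--                 out.append(("".join(buf), True))
--                 mode, buf = 0, []
--             else:
--                 buf.append(c)
--         elif mode == 1:
--             if c.isspace() or c == ",":
--                 out.append(("".join(buf), False))
--                 mode, buf = 0, []
--             else:
--                 buf.append(c)
--         else:
--             if c == '"':
--                 mode, buf = 2, []
--             elif not (c.isspace() or c == ","):
--                 mode, buf = 1, [c]
--     if mode == 1:
--         out.append(("".join(buf), False))
--     elif mode == 2:
--         tail = "".join(buf).strip()
--         if tail:
--             out.append((tail, True))
--     return out
-- ===== Notes on version B (the rewrite author's own statement) =====
-- stated objective: alternative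
-- what changed: A scans with an index, nested inner while-loops and slices; B is a single pass over the characters driven by a three-mode state machine (between-tokens / unquoted / quoted) with an accumulator buffer, emitting tokens as separators or closing quotes are reached.
import Mathlib
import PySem

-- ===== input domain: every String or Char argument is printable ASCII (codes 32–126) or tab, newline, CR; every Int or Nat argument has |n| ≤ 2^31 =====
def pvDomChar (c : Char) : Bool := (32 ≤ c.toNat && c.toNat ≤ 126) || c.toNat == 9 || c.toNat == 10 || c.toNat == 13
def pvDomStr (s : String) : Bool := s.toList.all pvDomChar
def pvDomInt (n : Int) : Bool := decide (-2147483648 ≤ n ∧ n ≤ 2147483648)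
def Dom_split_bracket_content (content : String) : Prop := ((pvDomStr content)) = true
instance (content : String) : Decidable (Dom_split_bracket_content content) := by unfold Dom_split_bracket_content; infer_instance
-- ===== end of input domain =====

-- B replaces A's index-and-slice scanner (nested inner loops) by a single-pass state
-- machine (fold with mode/buffer accumulator); objective: alternative (same cost).

-- ===== PORT A =====
-- A's separator test: content[i].isspace() or content[i] == ","
def sepA (c : Char) : Bool := PySem.Chars.isspace c || c == ','

-- A's inner while loop "while i < n and content[i] != '\"'" together with the slices
-- content[start:i] / content[start:]: returns (scanned chars, some rest-after-closing-quote | none)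
def scanQuote : List Char → List Char × Option (List Char)
  | [] => ([], none)
  | c :: cs =>
    if c == '"' then ([], some cs)
    else
      let (t, r) := scanQuote cs
      (c :: t, r)

-- A's inner while loop for the unquoted run together with the slice content[start:i]:
-- returns (run, rest starting at the separator or [])
def scanUnq : List Char → List Char × List Char
  | [] => ([], [])
  | c :: cs =>
    if sepA c then ([], c :: cs)
    else
      let (t, r) := scanUnq cs
      (c :: t, r)

theorem scanQuote_decomp (cs : List Char) :
    cs = (scanQuote cs).1 ++ ((scanQuote cs).2.elim [] (fun rest => '"' :: rest)) := by
  induction cs with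
  | nil => simp [scanQuote]
  | cons c cs ih =>
    by_cases hc : c = '"'
    · simp [scanQuote, hc]
    · rcases hr : scanQuote cs with ⟨t', r'⟩
      rw [hr] at ih
      cases r' <;> simpa [scanQuote, hc, hr] using ih

theorem scanQuote_rest_lt (cs t rest : List Char) (h : scanQuote cs = (t, some rest)) :
    rest.length < cs.length := by
  have := scanQuote_decomp cs
  rw [h] at this
  have hl := congrArg List.length this
  simp at hl
  omega

theorem scanUnq_decomp (cs : List Char) : cs = (scanUnq cs).1 ++ (scanUnq cs).2 := by
  induction cs with
  | nil => simp [scanUnq]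
  | cons c cs ih =>
    by_cases hc : sepA c
    · simp [scanUnq, hc]
    · rcases hr : scanUnq cs with ⟨t', r'⟩
      rw [hr] at ih
      simpa [scanUnq, hc, hr] using ih

theorem scanUnq_rest_le (cs t rest : List Char) (h : scanUnq cs = (t, rest)) :
    rest.length ≤ cs.length := by
  have := scanUnq_decomp cs
  rw [h] at this
  simp [this]

-- the outer while loop of A
def goA : List Char → List (String × Bool)
  | [] => []
  | c :: cs =>
    if sepA c then goA cs
    else if c == '"' then
      match h : scanQuote cs with
      | (tok, some rest) => (String.ofList tok, true) :: goA rest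
      | (tok, none) =>
        let t := PySem.Chars.strip tok
        if t = [] then [] else [(String.ofList t, true)]
    else
      match h : scanUnq cs with
      | (t0, rest) =>
        let tok := c :: t0
        let t := PySem.Chars.strip tok
        if t = [] then goA rest else (String.ofList t, false) :: goA rest
termination_by cs => cs.length
decreasing_by
  · simp
  · have := scanQuote_rest_lt cs tok rest h; simp; omega
  · have := scanUnq_rest_le cs t0 rest h; simp; omega
  · have := scanUnq_rest_le cs t0 rest h; simp; omega

def split_bracket_content (content : String) : List (String × Bool) := goA content.toList

-- ===== PORT B =====
-- B's loop body; mode 0 = between tokens, 1 = inside unquoted token, 2 = inside quoted token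
def stepB (st : List (String × Bool) × Nat × List Char) (c : Char) : List (String × Bool) × Nat × List Char :=
  let (out, mode, buf) := st
  if mode == 2 then
    if c == '"' then (out ++ [(String.ofList buf, true)], 0, [])
    else (out, 2, buf ++ [c])
  else if mode == 1 then
    if sepA c then (out ++ [(String.ofList buf, false)], 0, [])
    else (out, 1, buf ++ [c])
  else
    if c == '"' then (out, 2, [])
    else if !sepA c then (out, 1, [c])
    else (out, 0, [])

-- the code after B's loop
def finishB (st : List (String × Bool) × Nat × List Char) : List (String × Bool) :=
  let (out, mode, buf) := st
  if mode == 1 then out ++ [(String.ofList buf, false)]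
  else if mode == 2 then
    let t := PySem.Chars.strip buf
    if t = [] then out else out ++ [(String.ofList t, true)]
  else out

def split_bracket_content_alt (content : String) : List (String × Bool) :=
  finishB (content.toList.foldl stepB ([], 0, []))

-- ===== PRECONDITION & SPEC =====
def Spec_split_bracket_content (content : String) (out : List (String × Bool)) : Prop := out = split_bracket_content_alt content
instance (content : String) (out : List (String × Bool)) : Decidable (Spec_split_bracket_content content out) := by unfold Spec_split_bracket_content; infer_instance

-- ===== CLAIM (what is proved, stated in full; the proofs are below) =====
def Claim_equal_split_bracket_content : Prop := ∀ (content : String), Dom_split_bracket_content content → Spec_split_bracket_content content (split_bracket_content content)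

-- ===== LEMMAS AND PROOFS =====

theorem scanUnq_tok_nonsep (cs : List Char) : ∀ x ∈ (scanUnq cs).1, sepA x = false := by
  induction cs with
  | nil => simp [scanUnq]
  | cons c cs ih =>
    by_cases hc : sepA c
    · simp [scanUnq, hc]
    · rcases hr : scanUnq cs with ⟨t', r'⟩
      rw [hr] at ih
      intro x hx
      simp [scanUnq, hc, hr] at hx
      rcases hx with rfl | hx
      · simpa using hc
      · exact ih x hx

theorem scanUnq_rest_head (cs : List Char) : ∀ d rest', (scanUnq cs).2 = d :: rest' → sepA d = true := by
  induction cs with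
  | nil => simp [scanUnq]
  | cons c cs ih =>
    by_cases hc : sepA c
    · intro d rest' h
      simp [scanUnq, hc] at h
      rw [← h.1]; exact hc
    · rcases hr : scanUnq cs with ⟨t', r'⟩
      rw [hr] at ih
      intro d rest' h
      simp [scanUnq, hc, hr] at h
      exact ih d rest' h

theorem dropWhile_nonspace (l : List Char) (h : ∀ x ∈ l, PySem.Chars.isspace x = false) :
    List.dropWhile PySem.Chars.isspace l = l := by
  cases l with
  | nil => simp
  | cons c cs => simp [h c (by simp)]

theorem strip_of_nonsep (l : List Char) (h : ∀ x ∈ l, sepA x = false) :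
    PySem.Chars.strip l = l := by
  have hs : ∀ x ∈ l, PySem.Chars.isspace x = false := by
    intro x hx
    have := h x hx
    simp [sepA] at this
    exact this.1
  simp only [PySem.Chars.strip, PySem.Chars.lstrip, PySem.Chars.rstrip]
  rw [dropWhile_nonspace l hs, dropWhile_nonspace l.reverse (by simpa using hs), List.reverse_reverse]

theorem foldl_mode2 (cs : List Char) : ∀ out buf,
    cs.foldl stepB (out, 2, buf) =
      match scanQuote cs with
      | (tok, some rest) => rest.foldl stepB (out ++ [(String.ofList (buf ++ tok), true)], 0, [])
      | (tok, none) => (out, 2, buf ++ tok) := by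
  induction cs with
  | nil => intro out buf; simp [scanQuote]
  | cons c cs ih =>
    intro out buf
    by_cases hc : c = '"'
    · simp [List.foldl_cons, stepB, hc, scanQuote]
    · rcases hr : scanQuote cs with ⟨t', r'⟩
      have := ih out (buf ++ [c])
      rw [hr] at this
      cases r' <;> simpa [List.foldl_cons, stepB, hc, scanQuote, hr] using this

theorem foldl_mode1 (cs : List Char) : ∀ out buf,
    cs.foldl stepB (out, 1, buf) =
      match scanUnq cs with
      | (tok, []) => (out, 1, buf ++ tok)
      | (tok, _ :: rest') => rest'.foldl stepB (out ++ [(String.ofList (buf ++ tok), false)], 0, []) := by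
  induction cs with
  | nil => intro out buf; simp [scanUnq]
  | cons c cs ih =>
    intro out buf
    by_cases hc : sepA c
    · simp [List.foldl_cons, stepB, hc, scanUnq]
    · rcases hr : scanUnq cs with ⟨t', r'⟩
      have := ih out (buf ++ [c])
      rw [hr] at this
      cases r' <;> simpa [List.foldl_cons, stepB, hc, scanUnq, hr] using this

theorem goA_nil : goA [] = [] := by rw [goA]

theorem goA_sep (d : Char) (rest : List Char) (hd : sepA d = true) : goA (d :: rest) = goA rest := by
  rw [goA]; simp [hd]

theorem main_aux : ∀ (n : Nat) (cs : List Char), cs.length ≤ n →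
    ∀ out, finishB (cs.foldl stepB (out, 0, [])) = out ++ goA cs := by
  intro n
  induction n with
  | zero =>
    intro cs hlen out
    have : cs = [] := by cases cs <;> simp_all
    subst this
    simp [finishB, goA]
  | succ n ih =>
    intro cs hlen out
    cases cs with
    | nil => simp [finishB, goA]
    | cons c cs =>
      rw [goA]
      by_cases hsep : sepA c
      · have hc : ¬ c = '"' := by
          rintro rfl; simp [sepA, PySem.Chars.isspace] at hsep
        have hstep : stepB (out, 0, []) c = (out, 0, []) := by simp [stepB, hsep, hc]
        rw [List.foldl_cons, hstep]
        simpa [hsep] using ih cs (by simpa using Nat.le_of_succ_le_succ hlen) out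
      · by_cases hc : c = '"'
        · subst hc
          have hstep : stepB (out, 0, []) '"' = (out, 2, []) := rfl
          rw [List.foldl_cons, hstep, foldl_mode2]
          rcases hr : scanQuote cs with ⟨tok, r'⟩
          cases r' with
          | some rest =>
            have hlt := scanQuote_rest_lt cs tok rest hr
            have := ih rest (by simp at hlen; omega) (out ++ [(String.ofList tok, true)])
            simp [hsep, this]
          | none =>
            simp only [hsep]
            simp [finishB]
            split_ifs <;> simp
        · have hcb : (c == '"') = false := by simpa using hc
          have hstep : stepB (out, 0, []) c = (out, 1, [c]) := by simp [stepB, hsep, hcb]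
          rw [List.foldl_cons, hstep, foldl_mode1]
          rcases hr : scanUnq cs with ⟨t0, r'⟩
          have htok : ∀ x ∈ c :: t0, sepA x = false := by
            intro x hx
            rcases hx with _ | hx
            · simpa using hsep
            · have := scanUnq_tok_nonsep cs
              rw [hr] at this
              exact this x (by assumption)
          have hstrip : PySem.Chars.strip (c :: t0) = c :: t0 := strip_of_nonsep _ htok
          cases r' with
          | nil =>
            simp [finishB, hsep, hcb, hstrip, goA_nil]
          | cons d rest' =>
            have hd : sepA d = true := by
              have := scanUnq_rest_head cs d rest'
              rw [hr] at this
              exact this rfl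
            have hle : rest'.length ≤ cs.length := by
              have := scanUnq_rest_le cs t0 (d :: rest') hr
              simp at this; omega
            have := ih rest' (by simp at hlen; omega) (out ++ [(String.ofList (c :: t0), false)])
            simp [hsep, hcb, hstrip, goA_sep d rest' hd, this]

-- ===== VERDICT (by name: the statement is the Claim_ definition above) =====
theorem split_bracket_content_spec : Claim_equal_split_bracket_content := by
  intro content _
  unfold Spec_split_bracket_content split_bracket_content split_bracket_content_alt
  simpa using (main_aux content.toList.length content.toList le_rfl []).symm
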